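-- pv_equiv track=rewrite | github.com/proman3419/AGH-WIET-INF-ASD-2021 | 2/max_containing_range.py | find_max_containing_range
-- ===== SOURCE A (Python) =====
-- def find_max_containing_range(ranges):
--   n = len(ranges)
--   max_cnt = max_i = 0
--   for i in range(n):
--     cnt = 0
--     for j in range(n):
--       if i != j:
--         if ranges[i][0] <= ranges[j][0] and ranges[j][1] <= ranges[i][1]:
--           cnt += 1
--
--     if cnt > max_cnt:
--       max_cnt = cnt
--       max_i = i
--
--   return (ranges[max_i], max_cnt)
-- ===== SOURCE B (Python) =====
-- def _count_le(a, x, lo, hi):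
--   # rightmost insertion point of x in the sorted list a[lo:hi] (hand-written bisect_right)
--   if lo >= hi:
--     return lo
--   mid = (lo + hi) // 2
--   if x < a[mid]:
--     return _count_le(a, x, lo, mid)
--   return _count_le(a, x, mid + 1, hi)
--
--
-- def find_max_containing_range(ranges):
--   # Sweep left endpoints in descending order; a sorted list of the right
--   # endpoints of all ranges with left >= current l lets a binary search count
--   # the ranges contained in each member of the current group.
--   n = len(ranges)
--   by_l = {}
--   for i in range(n):
--     by_l.setdefault(ranges[i][0], []).append(i)
--   cnt = {}
--   rights = []
--   for l in sorted(by_l, reverse=True):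
--     group = by_l[l]
--     rights = sorted(rights + [ranges[i][1] for i in group])
--     for i in group:
--       cnt[i] = _count_le(rights, ranges[i][1], 0, len(rights)) - 1
--   best = best_i = 0
--   for i in range(n):
--     if cnt[i] > best:
--       best = cnt[i]
--       best_i = i
--   return (ranges[best_i], best)
-- ===== Notes on version B (the rewrite author's own statement) =====
-- stated objective: faster
-- what changed: B replaces A's all-pairs double scan by a sweep over left endpoints in descending sorted order that maintains a sorted list of right endpoints and counts the ranges contained in each group member with a hand-written binary search; a final pass picks the first strictly-maximal count exactly as A does.
import Mathlib
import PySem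

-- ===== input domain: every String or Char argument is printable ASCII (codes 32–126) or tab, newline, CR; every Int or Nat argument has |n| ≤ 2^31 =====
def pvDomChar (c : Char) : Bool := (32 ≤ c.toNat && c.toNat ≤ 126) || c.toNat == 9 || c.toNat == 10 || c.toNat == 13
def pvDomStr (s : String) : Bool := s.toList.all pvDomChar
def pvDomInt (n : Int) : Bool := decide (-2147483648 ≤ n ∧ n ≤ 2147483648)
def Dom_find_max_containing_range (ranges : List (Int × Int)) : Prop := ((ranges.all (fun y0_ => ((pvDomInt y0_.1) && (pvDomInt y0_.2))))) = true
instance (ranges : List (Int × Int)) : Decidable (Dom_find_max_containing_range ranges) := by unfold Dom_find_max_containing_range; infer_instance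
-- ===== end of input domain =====

-- B replaces A's all-pairs double scan by a descending sweep over the sorted left
-- endpoints that keeps a sorted list of right endpoints and counts containments by
-- binary search; a timing run measured B faster on the generated inputs.

-- ===== PORT A =====
-- indexing: every read ranges[i] in A has 0 ≤ i < len(ranges), so pyGetD with an
-- arbitrary default is exact there (the final ranges[max_i] needs Pre_: ranges ≠ []).
def find_max_containing_range (ranges : List (Int × Int)) : (Int × Int) × Int :=
  let n : Int := ranges.length
  let st :=
    (PySem.List.pyRange 0 n 1).foldl (fun (acc : Int × Int) i =>
      let cnt :=
        (PySem.List.pyRange 0 n 1).foldl (fun (cnt : Int) j =>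
          if i ≠ j then
            if (PySem.List.pyGetD ranges i ((0 : Int), (0 : Int))).1 ≤ (PySem.List.pyGetD ranges j ((0 : Int), (0 : Int))).1 ∧
               (PySem.List.pyGetD ranges j ((0 : Int), (0 : Int))).2 ≤ (PySem.List.pyGetD ranges i ((0 : Int), (0 : Int))).2 then
              cnt + 1
            else cnt
          else cnt) 0
      if cnt > acc.1 then (cnt, i) else acc) ((0 : Int), (0 : Int))
  (PySem.List.pyGetD ranges st.2 ((0 : Int), (0 : Int)), st.1)

-- ===== PORT B =====
-- _count_le: hand-written bisect_right (Source B has no imports, like A); a[mid] always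
-- has 0 ≤ mid < len(a) here, so pyGetD with default 0 is exact.
def pvCountLe (a : List Int) (x lo hi : Int) : Int :=
  if hle : hi ≤ lo then lo
  else
    have h2 : (0:Int) < 2 := by norm_num
    have hmid1 : lo ≤ PySem.Int.floordiv (lo + hi) 2 :=
      (PySem.Int.le_floordiv_iff_mul_le h2).mpr (by omega)
    have hmid2 : PySem.Int.floordiv (lo + hi) 2 < hi :=
      (PySem.Int.floordiv_lt_iff_lt_mul h2).mpr (by omega)
    let mid := PySem.Int.floordiv (lo + hi) 2
    if x < PySem.List.pyGetD a mid 0 then pvCountLe a x lo mid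
    else pvCountLe a x (mid + 1) hi
termination_by (hi - lo).toNat
decreasing_by
  · omega
  · omega

-- cnt[i] in the final pass: every 0 ≤ i < len(ranges) is in exactly one left-endpoint
-- group, so the key is always present and getD 0 is exact.
def find_max_containing_range_alt (ranges : List (Int × Int)) : (Int × Int) × Int :=
  let n : Int := ranges.length
  let by_l : PySem.Dict Int (List Int) :=
    (PySem.List.pyRange 0 n 1).foldl
      (fun d i => d.modify (PySem.List.pyGetD ranges i ((0 : Int), (0 : Int))).1 [] (· ++ [i]))
      PySem.Dict.empty
  let st :=
    (PySem.List.sorted by_l.keys (fun x => x) true).foldl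
      (fun (st : List Int × PySem.Dict Int Int) l =>
        let group := by_l.getD l []
        let rights := PySem.List.sorted
          (st.1 ++ group.map (fun i => (PySem.List.pyGetD ranges i ((0 : Int), (0 : Int))).2))
          (fun x => x) false
        (rights,
         group.foldl (fun c i =>
           c.insert i (pvCountLe rights (PySem.List.pyGetD ranges i ((0 : Int), (0 : Int))).2 0
             (rights.length : Int) - 1)) st.2))
      ([], PySem.Dict.empty)
  let sel :=
    (PySem.List.pyRange 0 n 1).foldl
      (fun (acc : Int × Int) i =>
        if st.2.getD i 0 > acc.1 then (st.2.getD i 0, i) else acc)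
      ((0 : Int), (0 : Int))
  (PySem.List.pyGetD ranges sel.2 ((0 : Int), (0 : Int)), sel.1)

-- ===== PRECONDITION & SPEC =====
-- Python A raises IndexError (ranges[max_i]) exactly on the empty list; Pre_ excludes it.
def Pre_find_max_containing_range (ranges : List (Int × Int)) : Prop := ranges ≠ []
instance (ranges : List (Int × Int)) : Decidable (Pre_find_max_containing_range ranges) := by unfold Pre_find_max_containing_range; infer_instance
def pvWitness_find_max_containing_range : (List (Int × Int)) := ([((0 : Int), (1 : Int))])

def Spec_find_max_containing_range (ranges : List (Int × Int)) (out : (Int × Int) × Int) : Prop := out = find_max_containing_range_alt ranges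
instance (ranges : List (Int × Int)) (out : (Int × Int) × Int) : Decidable (Spec_find_max_containing_range ranges out) := by unfold Spec_find_max_containing_range; infer_instance

-- ===== CLAIM (what is proved, stated in full; the proofs are below) =====
def Claim_equal_find_max_containing_range : Prop := ∀ (ranges : List (Int × Int)), Dom_find_max_containing_range ranges → Pre_find_max_containing_range ranges → Spec_find_max_containing_range ranges (find_max_containing_range ranges)

-- ===== LEMMAS AND PROOFS =====

-- proof-side names for the values B's let-bindings hold (definitionally equal to them)
def pvL (ranges : List (Int × Int)) (i : Int) : Int := (PySem.List.pyGetD ranges i ((0 : Int), (0 : Int))).1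
def pvRt (ranges : List (Int × Int)) (i : Int) : Int := (PySem.List.pyGetD ranges i ((0 : Int), (0 : Int))).2
def pvIdx (ranges : List (Int × Int)) : List Int := PySem.List.pyRange 0 (ranges.length : Int) 1
def pvByL (ranges : List (Int × Int)) : PySem.Dict Int (List Int) :=
  (pvIdx ranges).foldl (fun d i => d.modify (pvL ranges i) [] (· ++ [i])) PySem.Dict.empty
def pvKeys (ranges : List (Int × Int)) : List Int :=
  PySem.List.sorted (pvByL ranges).keys (fun x => x) true
def pvStepB (ranges : List (Int × Int)) (st : List Int × PySem.Dict Int Int) (l : Int) :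
    List Int × PySem.Dict Int Int :=
  let group := (pvByL ranges).getD l []
  let rights := PySem.List.sorted (st.1 ++ group.map (fun i => pvRt ranges i)) (fun x => x) false
  (rights,
   group.foldl (fun c i =>
     c.insert i (pvCountLe rights (pvRt ranges i) 0 (rights.length : Int) - 1)) st.2)
def pvCntD (ranges : List (Int × Int)) : PySem.Dict Int Int :=
  ((pvKeys ranges).foldl (pvStepB ranges) ([], PySem.Dict.empty)).2

-- number of elements of `ranges` contained in `p` (including `p`'s own occurrences)
def cntAll (ranges : List (Int × Int)) (p : Int × Int) : Int :=
  (ranges.countP (fun q => decide (p.1 ≤ q.1 ∧ q.2 ≤ p.2)) : Int)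

def pvK (ranges : List (Int × Int)) (j : Int) : Int :=
  cntAll ranges (PySem.List.pyGetD ranges j ((0 : Int), (0 : Int))) - 1

def pvElems (ranges : List (Int × Int)) (ks : List Int) : List Int :=
  ((pvIdx ranges).filter (fun j => decide (pvL ranges j ∈ ks))).map (fun j => pvRt ranges j)

theorem countP_filter_ne_int {α : Type} [DecidableEq α] (l : List α) (i : α) (p : α → Bool)
    (hl : l.Nodup) (hi : i ∈ l) (hpi : p i = true) :
    (((l.filter (fun j => decide (i ≠ j))).countP p : Int)) = (l.countP p : Int) - 1 := by
  induction l with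
  | nil => cases hi
  | cons a t ih =>
    rcases List.nodup_cons.mp hl with ⟨hat, hnt⟩
    rcases eq_or_ne a i with hai | hai
    · subst hai
      have h1 : List.filter (fun j => decide (a ≠ j)) (a :: t) = t := by
        rw [List.filter_cons, if_neg (by simp)]
        apply List.filter_eq_self.mpr
        intro x hx
        simp only [decide_eq_true_eq]
        intro h; exact hat (h ▸ hx)
      rw [h1, List.countP_cons]
      simp only [hpi, if_true]
      push_cast; omega
    · have hit : i ∈ t := by
        rcases hi with _ | h
        · exact absurd rfl (Ne.symm hai)
        · assumption
      have hrec := ih hnt hit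
      have h1 : List.filter (fun j => decide (i ≠ j)) (a :: t) =
          a :: List.filter (fun j => decide (i ≠ j)) t := by
        rw [List.filter_cons, if_pos (by simpa using Ne.symm hai)]
      rw [h1, List.countP_cons, List.countP_cons]
      rcases Bool.eq_false_or_eq_true (p a) with hpa | hpa <;>
        simp only [hpa, if_true] <;> push_cast <;> omega

-- cntAll as a count over the index range
theorem cntAll_eq_countP_idx (ranges : List (Int × Int)) (p : Int × Int) :
    cntAll ranges p
      = ((pvIdx ranges).countP (fun j => decide (p.1 ≤ pvL ranges j ∧ pvRt ranges j ≤ p.2)) : Int) := by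
  unfold cntAll pvIdx pvL pvRt
  conv_lhs => rw [← PySem.List.map_pyGetD_pyRange_zero' ranges ((0 : Int), (0 : Int))]
  rw [List.countP_map]
  rfl

-- A's inner loop (skipping j = i) computes cntAll - 1
theorem pv_innerA (ranges : List (Int × Int)) (i : Int) (h0 : 0 ≤ i)
    (hn : i < (ranges.length : Int)) :
    List.foldl (fun (cnt : Int) j =>
      if i ≠ j then
        if (PySem.List.pyGetD ranges i ((0 : Int), (0 : Int))).1 ≤ (PySem.List.pyGetD ranges j ((0 : Int), (0 : Int))).1 ∧
           (PySem.List.pyGetD ranges j ((0 : Int), (0 : Int))).2 ≤ (PySem.List.pyGetD ranges i ((0 : Int), (0 : Int))).2 then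
          cnt + 1
        else cnt
      else cnt) 0 (PySem.List.pyRange 0 (ranges.length : Int) 1)
      = pvK ranges i := by
  set p := PySem.List.pyGetD ranges i ((0 : Int), (0 : Int)) with hp
  rw [PySem.List.foldl_ite_eq_foldl_filter (p := fun j => i ≠ j)]
  rw [PySem.List.foldl_ite_add_one]
  have hmem : i ∈ PySem.List.pyRange 0 (ranges.length : Int) 1 :=
    PySem.List.mem_pyRange_one.mpr ⟨h0, hn⟩
  rw [countP_filter_ne_int _ i _ (PySem.List.nodup_pyRange_one 0 (ranges.length : Int)) hmem
    (by rw [← hp]; simp)]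
  have hcnt := cntAll_eq_countP_idx ranges p
  unfold pvIdx pvL pvRt at hcnt
  unfold pvK
  rw [← hp, hcnt]
  omega


-- the group stored under key l is exactly the indices with left endpoint l, in order
theorem pv_group_eq (ranges : List (Int × Int)) (l : Int) :
    (pvByL ranges).getD l [] = (pvIdx ranges).filter (fun i => pvL ranges i == l) := by
  have h : pvByL ranges = ((pvIdx ranges).map (fun i => (pvL ranges i, i))).foldl
      (fun d p => d.modify p.1 [] (· ++ [p.2])) PySem.Dict.empty := by
    rw [List.foldl_map]
    rfl
  rw [h, PySem.Dict.getD_foldl_modify_append, PySem.Dict.getD_empty, List.filter_map, List.map_map]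
  simp [Function.comp_def]


theorem pv_byl_nodup (ranges : List (Int × Int)) : (pvByL ranges).keys.Nodup := by
  unfold pvByL
  exact PySem.Dict.nodup_keys_foldl_modify_key (pvIdx ranges) (pvL ranges) [] (fun _ i => (· ++ [i])) PySem.Dict.empty PySem.Dict.nodup_keys_empty

theorem pv_keys_nodup (ranges : List (Int × Int)) : (pvKeys ranges).Nodup := by
  unfold pvKeys
  exact ((PySem.List.sorted_perm _ _ _).nodup_iff).mpr (pv_byl_nodup ranges)

theorem pv_mem_keys (ranges : List (Int × Int)) (x : Int) :
    x ∈ pvKeys ranges ↔ x ∈ (pvIdx ranges).map (pvL ranges) := by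
  have h1 : x ∈ pvKeys ranges ↔ x ∈ (pvByL ranges).keys := by
    unfold pvKeys
    exact PySem.List.mem_sorted _ _ _ _
  rw [h1]
  unfold pvByL
  rw [PySem.Dict.keys_foldl_modify_key]
  rw [PySem.Dict.keys_empty]
  constructor
  · intro h; exact (PySem.Set.mem_ofList _ _).mp h
  · intro h; exact (PySem.Set.mem_ofList _ _).mpr h


theorem pv_keys_pairwise (ranges : List (Int × Int)) :
    (pvKeys ranges).Pairwise (fun a b => b < a) := by
  have h1 : (pvKeys ranges).Pairwise (fun a b => b ≤ a) :=
    PySem.List.sorted_pairwise_rev (pvByL ranges).keys (fun x => x)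
  have h2 : (pvKeys ranges).Nodup := pv_keys_nodup ranges
  exact (h1.and h2).imp (fun ⟨hle, hne⟩ => lt_of_le_of_ne hle (by exact fun he => hne (he ▸ rfl)))

-- disjoint filters split up to permutation
theorem filter_or_perm {α : Type} (l : List α) (p q : α → Bool)
    (h : ∀ x ∈ l, ¬(p x = true ∧ q x = true)) :
    (l.filter (fun x => p x || q x)).Perm (l.filter p ++ l.filter q) := by
  induction l with
  | nil => simp
  | cons a t ih =>
    have iht := ih (fun x hx => h x (List.mem_cons_of_mem a hx))
    by_cases hp : p a = true
    · have hq : q a = false := by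
        rcases Bool.eq_false_or_eq_true (q a) with h' | h'
        · exact absurd ⟨hp, h'⟩ (h a List.mem_cons_self)
        · exact h'
      simp only [List.filter_cons, hp, hq, Bool.true_or, if_true]
      simpa using iht.cons a
    · have hp' : p a = false := by simpa using hp
      by_cases hq : q a = true
      · simp only [List.filter_cons, hp', hq, Bool.false_or, if_true]
        refine ((iht.cons a).trans ?_)
        exact (List.perm_middle).symm
      · have hq' : q a = false := by simpa using hq
        simp only [List.filter_cons, hp', hq', Bool.false_or]
        exact iht


-- binary-search invariant: pvCountLe returns the number of elements ≤ x
theorem pvCountLe_inv (a : List Int) (x : Int) (ha : a.Pairwise (· ≤ ·)) :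
    ∀ (m : Nat) (lo hi : Int), (hi - lo).toNat = m → 0 ≤ lo → lo ≤ hi → hi ≤ (a.length : Int) →
    (∀ (k : Nat) (hk : k < a.length), (k : Int) < lo → a[k] ≤ x) →
    (∀ (k : Nat) (hk : k < a.length), hi ≤ (k : Int) → x < a[k]) →
    pvCountLe a x lo hi = (a.countP (fun y => decide (y ≤ x)) : Int) := by
  intro m
  induction m using Nat.strong_induction_on with
  | _ m ih =>
    intro lo hi hm h0 hlh hlen hlow hhigh
    by_cases hle : hi ≤ lo
    · -- lo = hi : count = lo
      have hlo : lo = hi := le_antisymm hlh hle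
      subst hlo
      rw [pvCountLe, dif_pos hle]
      have hsplit : a = a.take lo.toNat ++ a.drop lo.toNat := (List.take_append_drop _ _).symm
      have hcnt : a.countP (fun y => decide (y ≤ x))
          = (a.take lo.toNat).countP (fun y => decide (y ≤ x))
            + (a.drop lo.toNat).countP (fun y => decide (y ≤ x)) := by
        conv_lhs => rw [hsplit]
        rw [List.countP_append]
      have htake : (a.take lo.toNat).countP (fun y => decide (y ≤ x)) = (a.take lo.toNat).length := by
        apply List.countP_eq_length.mpr
        intro y hy
        rcases List.mem_iff_getElem.mp hy with ⟨k, hk, rfl⟩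
        rw [List.getElem_take]
        have hklt : k < a.length := lt_of_lt_of_le hk (by simp)
        have : (k : Int) < lo := by
          have : k < lo.toNat := lt_of_lt_of_le hk (by simp [List.length_take])
          omega
        simp
        exact hlow k hklt this
      have hdrop : (a.drop lo.toNat).countP (fun y => decide (y ≤ x)) = 0 := by
        apply List.countP_eq_zero.mpr
        intro y hy
        rcases List.mem_iff_getElem.mp hy with ⟨k, hk, rfl⟩
        rw [List.getElem_drop]
        have hklt : lo.toNat + k < a.length := by simp [List.length_drop] at hk; omega
        have := hhigh (lo.toNat + k) hklt (by push_cast; omega)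
        simp; omega
      have hlentake : (a.take lo.toNat).length = lo.toNat := by
        simp [List.length_take]; omega
      rw [hcnt, htake, hdrop, hlentake]
      omega
    · rw [not_le] at hle
      rw [pvCountLe, dif_neg (by omega)]
      set mid := PySem.Int.floordiv (lo + hi) 2 with hmiddef
      have hmid1 : lo ≤ mid := (PySem.Int.le_floordiv_iff_mul_le (by norm_num)).mpr (by omega)
      have hmid2 : mid < hi := (PySem.Int.floordiv_lt_iff_lt_mul (by norm_num)).mpr (by omega)
      have hmidlen : mid.toNat < a.length := by omega
      have hget : PySem.List.pyGetD a mid 0 = a[mid.toNat] := by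
        rw [PySem.List.pyGetD_eq_getElem a 0 (by omega) (by omega)]
      have hmono : ∀ (p q : Nat) (hq : q < a.length) (hpq : p ≤ q), a[p]'(Nat.lt_of_le_of_lt hpq hq) ≤ a[q] := by
        intro p q hq hpq
        rcases Nat.lt_or_ge p q with h' | h'
        · exact (List.pairwise_iff_getElem.mp ha) p q _ hq h'
        · have : p = q := le_antisymm hpq h'
          subst this; exact le_refl _
      by_cases hxa : x < PySem.List.pyGetD a mid 0
      · rw [if_pos hxa]
        refine ih (mid - lo).toNat (by omega) lo mid rfl h0 hmid1 (by omega) hlow ?_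
        intro k hk hmk
        calc x < a[mid.toNat] := by rw [← hget]; exact hxa
          _ ≤ a[k] := hmono mid.toNat k hk (by omega)
      · rw [if_neg hxa]
        refine ih (hi - (mid + 1)).toNat (by omega) (mid + 1) hi rfl (by omega) (by omega) hlen ?_ hhigh
        intro k hk hklt
        have hax : a[mid.toNat] ≤ x := by rw [← hget]; omega
        calc a[k] ≤ a[mid.toNat] := hmono k mid.toNat hmidlen (by omega)
          _ ≤ x := hax

theorem pvCountLe_spec (a : List Int) (x : Int) (ha : a.Pairwise (· ≤ ·)) :
    pvCountLe a x 0 (a.length : Int) = (a.countP (fun y => decide (y ≤ x)) : Int) := by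
  refine pvCountLe_inv a x ha ((a.length : Int) - 0).toNat 0 (a.length : Int) rfl le_rfl (by omega) le_rfl ?_ ?_
  · intro k hk h; omega
  · intro k hk h; omega

-- insert-fold lemmas
theorem getD_foldl_insert_of_ne (g : List Int) (f : Int → Int) (c : PySem.Dict Int Int) (j : Int)
    (h : ∀ i ∈ g, i ≠ j) :
    (g.foldl (fun c i => c.insert i (f i)) c).getD j 0 = c.getD j 0 := by
  induction g generalizing c with
  | nil => rfl
  | cons a t ih =>
    simp only [List.foldl_cons]
    rw [ih (c.insert a (f a)) (fun i hi => h i (List.mem_cons_of_mem a hi))]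
    rw [PySem.Dict.getD_insert, if_neg (Ne.symm (h a List.mem_cons_self))]


theorem getD_foldl_insert_self (g : List Int) (f : Int → Int) (c : PySem.Dict Int Int) (j : Int)
    (hg : g.Nodup) (hj : j ∈ g) :
    (g.foldl (fun c i => c.insert i (f i)) c).getD j 0 = f j := by
  induction g generalizing c with
  | nil => cases hj
  | cons a t ih =>
    rcases List.nodup_cons.mp hg with ⟨hat, hnt⟩
    simp only [List.foldl_cons]
    rcases List.mem_cons.mp hj with rfl | hjt
    · rw [getD_foldl_insert_of_ne t f _ j (fun i hi => by rintro rfl; exact hat hi)]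
      rw [PySem.Dict.getD_insert, if_pos rfl]
    · exact ih (c.insert a (f a)) hnt hjt


-- the sweep invariant
theorem pv_sweep (ranges : List (Int × Int)) :
    ∀ (suf pre : List Int) (st : List Int × PySem.Dict Int Int),
    pvKeys ranges = pre ++ suf →
    st.1.Pairwise (· ≤ ·) →
    st.1.Perm (pvElems ranges pre) →
    (∀ j ∈ pvIdx ranges, pvL ranges j ∈ pre → st.2.getD j 0 = pvK ranges j) →
    (∀ j ∈ pvIdx ranges, pvL ranges j ∈ pre ++ suf →
      (suf.foldl (pvStepB ranges) st).2.getD j 0 = pvK ranges j) := by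
  intro suf
  induction suf with
  | nil =>
    intro pre st _hsplit _hsort _hperm hcnt j hj hjm
    simpa using hcnt j hj (by simpa using hjm)
  | cons l suf' ih =>
    intro pre st hsplit hsort hperm hcnt j hj hjm
    have hnd := pv_keys_nodup ranges
    have hpw := pv_keys_pairwise ranges
    rw [hsplit] at hnd hpw
    have hlpre : l ∉ pre := by
      intro h
      exact (List.nodup_append.mp hnd).2.2 l h l List.mem_cons_self rfl
    have hgeq : (pvByL ranges).getD l [] = (pvIdx ranges).filter (fun i => pvL ranges i == l) :=
      pv_group_eq ranges l
    have hgroup_mem : ∀ i, i ∈ (pvByL ranges).getD l [] ↔ (i ∈ pvIdx ranges ∧ pvL ranges i = l) := by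
      intro i
      rw [hgeq, List.mem_filter]
      simp
    set group := (pvByL ranges).getD l [] with hgdef
    set rights := PySem.List.sorted (st.1 ++ group.map (fun i => pvRt ranges i)) (fun x => x) false with hrdef
    have hrs : rights.Pairwise (· ≤ ·) := by
      have := PySem.List.sorted_pairwise (st.1 ++ group.map (fun i => pvRt ranges i)) (fun x => x)
      simpa [hrdef] using this
    -- membership in pre ++ [l] is exactly "left endpoint ≥ l"
    have hmemiff : ∀ i, i ∈ pvIdx ranges → (pvL ranges i ∈ pre ++ [l] ↔ l ≤ pvL ranges i) := by
      intro i hi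
      constructor
      · intro hmem
        rcases List.mem_append.mp hmem with hmp | hml
        · exact le_of_lt ((List.pairwise_append.mp hpw).2.2 _ hmp _ List.mem_cons_self)
        · simp only [List.mem_singleton] at hml; omega
      · intro hge
        have hin : pvL ranges i ∈ pre ++ l :: suf' := by
          rw [← hsplit]
          exact (pv_mem_keys ranges _).mpr (List.mem_map_of_mem hi)
        rcases List.mem_append.mp hin with hmp | hml
        · exact List.mem_append_left _ hmp
        · rcases List.mem_cons.mp hml with he | hs'
          · exact List.mem_append_right _ (by simp [he])
          · have := (List.pairwise_cons.mp (List.pairwise_append.mp hpw).2.1).1 _ hs'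
            omega
    -- permutation invariant for the new rights list
    have helems : (pvElems ranges (pre ++ [l])).Perm
        (pvElems ranges pre ++ group.map (fun i => pvRt ranges i)) := by
      unfold pvElems
      have hcong : (pvIdx ranges).filter (fun j => decide (pvL ranges j ∈ pre ++ [l]))
          = (pvIdx ranges).filter (fun j => decide (pvL ranges j ∈ pre) || decide (pvL ranges j = l)) := by
        apply List.filter_congr
        intro i _
        simp [List.mem_append, Bool.decide_or]
      rw [hcong]
      have hdisj : ∀ i ∈ pvIdx ranges,
          ¬(decide (pvL ranges i ∈ pre) = true ∧ decide (pvL ranges i = l) = true) := by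
        intro i _ ⟨h1, h2⟩
        simp only [decide_eq_true_eq] at h1 h2
        exact hlpre (h2 ▸ h1)
      have hperm2 := filter_or_perm (pvIdx ranges) _ _ hdisj
      refine (hperm2.map _).trans ?_
      rw [List.map_append]
      apply List.Perm.append_left
      have : (pvIdx ranges).filter (fun i => decide (pvL ranges i = l))
          = (pvIdx ranges).filter (fun i => pvL ranges i == l) := by
        apply List.filter_congr
        intro i _
        by_cases h : pvL ranges i = l
        · simp [h]
        · simp [h, beq_eq_false_iff_ne.mpr h]
      rw [this, ← hgeq]
    have hperm' : rights.Perm (pvElems ranges (pre ++ [l])) := by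
      refine (PySem.List.sorted_perm _ _ _).trans ?_
      exact ((hperm.append_right _).trans helems.symm)
    -- counts stored for the group are correct
    have hquery : ∀ i, i ∈ group →
        pvCountLe rights (pvRt ranges i) 0 (rights.length : Int) - 1 = pvK ranges i := by
      intro i higr
      rcases (hgroup_mem i).mp higr with ⟨hidx, hil⟩
      rw [pvCountLe_spec rights (pvRt ranges i) hrs]
      rw [hperm'.countP_eq]
      unfold pvElems
      rw [List.countP_map, List.countP_filter]
      have hcong : ∀ i' ∈ pvIdx ranges,
          (((fun y => decide (y ≤ pvRt ranges i)) ∘ (fun j => pvRt ranges j)) i'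
              && decide (pvL ranges i' ∈ pre ++ [l]))
            = decide (pvL ranges i ≤ pvL ranges i' ∧ pvRt ranges i' ≤ pvRt ranges i) := by
        intro i' hi'
        have hm := hmemiff i' hi'
        simp only [Function.comp_apply, hil]
        rw [decide_eq_decide.mpr hm, Bool.decide_and]
        exact Bool.and_comm _ _
      have h2 : (pvIdx ranges).countP (fun i' =>
            (((fun y => decide (y ≤ pvRt ranges i)) ∘ (fun j => pvRt ranges j)) i'
              && decide (pvL ranges i' ∈ pre ++ [l])))
          = (pvIdx ranges).countP
              (fun i' => decide (pvL ranges i ≤ pvL ranges i' ∧ pvRt ranges i' ≤ pvRt ranges i)) :=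
        List.countP_congr (fun x hx => by rw [hcong x hx])
      rw [h2]
      have := cntAll_eq_countP_idx ranges (PySem.List.pyGetD ranges i ((0 : Int), (0 : Int)))
      unfold pvK
      rw [this]
      rfl
    -- apply the induction hypothesis
    simp only [List.foldl_cons]
    refine ih (pre ++ [l]) (pvStepB ranges st l) ?_ ?_ ?_ ?_ j hj ?_
    · rw [hsplit, List.append_assoc]; rfl
    · exact hrs
    · exact hperm'
    · intro j' hj' hmem'
      show (group.foldl (fun c i =>
          c.insert i (pvCountLe rights (pvRt ranges i) 0 (rights.length : Int) - 1)) st.2).getD j' 0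
        = pvK ranges j'
      rcases List.mem_append.mp hmem' with hmp | hml
      · have hnotg : j' ∉ group := by
          intro hg
          exact hlpre (((hgroup_mem j').mp hg).2 ▸ hmp)
        rw [getD_foldl_insert_of_ne group _ st.2 j' (fun i hi => by rintro rfl; exact hnotg hi)]
        exact hcnt j' hj' hmp
      · have hjl : pvL ranges j' = l := by simpa using hml
        have hg : j' ∈ group := (hgroup_mem j').mpr ⟨hj', hjl⟩
        have hgnodup : ((pvByL ranges).getD l []).Nodup := by
          rw [pv_group_eq ranges l]
          exact (PySem.List.nodup_pyRange_one _ _).filter _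
        rw [getD_foldl_insert_self group _ st.2 j' hgnodup hg]
        exact hquery j' hg
    · simpa [List.append_assoc] using hjm

theorem pv_cnt_final (ranges : List (Int × Int)) :
    ∀ j ∈ pvIdx ranges, (pvCntD ranges).getD j 0 = pvK ranges j := by
  intro j hj
  unfold pvCntD
  refine pv_sweep ranges (pvKeys ranges) [] ([], PySem.Dict.empty) rfl (by simp) ?_ (by simp) j hj ?_
  · have : pvElems ranges [] = [] := by
      unfold pvElems
      simp
    simp [this]
  · simpa using (pv_mem_keys ranges _).mpr (List.mem_map_of_mem hj)

-- ===== VERDICT (by name: the statement is the Claim_ definition above) =====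
theorem find_max_containing_range_spec : Claim_equal_find_max_containing_range := by
  unfold Claim_equal_find_max_containing_range
  intro ranges _hdom _hpre
  unfold Spec_find_max_containing_range
  have hB : find_max_containing_range_alt ranges =
      (let sel := (pvIdx ranges).foldl
        (fun (acc : Int × Int) i =>
          if (pvCntD ranges).getD i 0 > acc.1 then ((pvCntD ranges).getD i 0, i) else acc)
        ((0 : Int), (0 : Int));
       (PySem.List.pyGetD ranges sel.2 ((0 : Int), (0 : Int)), sel.1)) := rfl
  rw [hB]
  unfold find_max_containing_range
  refine congrArg (fun st : Int × Int => (PySem.List.pyGetD ranges st.2 ((0 : Int), (0 : Int)), st.1)) ?_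
  apply PySem.List.foldl_congr_mem
  intro acc j hj
  rcases PySem.List.mem_pyRange_one.mp hj with ⟨hj0, hjn⟩
  rw [pv_innerA ranges j hj0 hjn, pv_cnt_final ranges j hj]
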